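-- pv_equiv track=rewrite | github.com/itay-nakash/GrayCodeKnuth | knuth.py | find_decoded_length2
-- ===== SOURCE A (Python) =====
-- from math import ceil, floor, log2, log
--
-- def get_encoded_length(data_len):
--     return data_len + ceil(log2(data_len + 1)) + 1
--
-- def find_decoded_length2(encoded_length):
--     start = 0
--     end = encoded_length
--
--     while start <= end:
--         mid = (start + end) // 2
--         mid_encoded_length = get_encoded_length(mid)
--         if encoded_length == mid_encoded_length:
--             return mid
--
--         if encoded_length < mid_encoded_length:
--             end = mid - 1
--         else:
--             start = mid + 1
-- ===== SOURCE B (Python) =====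
-- def find_decoded_length2(encoded_length):
--     # enc(n) = n + n.bit_length() + 1 is strictly increasing, so a match n must
--     # satisfy n = encoded_length - k - 1 where k = n.bit_length() <= encoded_length.bit_length().
--     for k in range(encoded_length.bit_length() + 1):
--         n = encoded_length - k - 1
--         if n >= 0 and n.bit_length() == k:
--             return n
--     return None
-- ===== Notes on version B (the rewrite author's own statement) =====
-- stated objective: simpler
-- what changed: Replaces the binary search over the whole candidate range by a direct scan over the logarithmically many possible bit lengths, exploiting that the encoded length is strictly increasing and determined by the decoded length's bit length.
import Mathlib
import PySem

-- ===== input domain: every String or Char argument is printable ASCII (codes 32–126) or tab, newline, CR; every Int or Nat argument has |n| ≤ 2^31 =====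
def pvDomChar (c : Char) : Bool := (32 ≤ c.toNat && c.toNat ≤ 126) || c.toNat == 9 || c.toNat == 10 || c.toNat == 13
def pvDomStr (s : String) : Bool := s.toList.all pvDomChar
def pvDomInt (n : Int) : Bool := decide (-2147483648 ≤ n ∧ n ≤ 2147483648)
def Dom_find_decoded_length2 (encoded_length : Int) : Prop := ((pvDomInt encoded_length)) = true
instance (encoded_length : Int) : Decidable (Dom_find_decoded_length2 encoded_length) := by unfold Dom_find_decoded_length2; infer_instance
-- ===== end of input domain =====

-- B replaces A's O(log e)-step binary search (each step recomputing the encoded length) by a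
-- direct scan over the O(log e) possible bit lengths k, checking n = e - k - 1; objective: simpler.

-- ===== PORT A =====
-- Python: data_len + ceil(log2(data_len + 1)) + 1.  For 0 ≤ data_len (the only arguments A's
-- search reaches: start stays ≥ 0, so mid ≥ 0) ceil(log2(data_len+1)) equals data_len.bit_length(),
-- ported exactly as PySem.Int.bitLength; float log2 introduces no error at these magnitudes.
def get_encoded_length (data_len : Int) : Int :=
  data_len + (PySem.Int.bitLength data_len : Int) + 1

-- the while-loop of A, state (start, end); fuel = size of the remaining interval, which
-- shrinks by at least one per iteration, so the initial fuel is never exhausted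
def searchA (encoded_length : Int) : Nat → Int → Int → Option Int
  | 0, _, _ => none
  | fuel + 1, start, stop =>
    if start ≤ stop then
      let mid := PySem.Int.floordiv (start + stop) 2
      let mid_encoded_length := get_encoded_length mid
      if encoded_length = mid_encoded_length then some mid
      else if encoded_length < mid_encoded_length then searchA encoded_length fuel start (mid - 1)
      else searchA encoded_length fuel (mid + 1) stop
    else none

def find_decoded_length2 (encoded_length : Int) : Option Int :=
  searchA encoded_length (encoded_length + 1).toNat 0 encoded_length

-- ===== PORT B =====
def find_decoded_length2_alt (encoded_length : Int) : Option Int :=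
  (PySem.List.pyRange 0 ((PySem.Int.bitLength encoded_length : Int) + 1) 1).findSome? (fun k =>
    let n := encoded_length - k - 1
    if 0 ≤ n ∧ (PySem.Int.bitLength n : Int) = k then some n else none)

-- ===== PRECONDITION & SPEC =====
def Spec_find_decoded_length2 (encoded_length : Int) (out : Option Int) : Prop := out = find_decoded_length2_alt encoded_length
instance (encoded_length : Int) (out : Option Int) : Decidable (Spec_find_decoded_length2 encoded_length out) := by unfold Spec_find_decoded_length2; infer_instance

-- ===== CLAIM (what is proved, stated in full; the proofs are below) =====
def Claim_equal_find_decoded_length2 : Prop := ∀ (encoded_length : Int), Dom_find_decoded_length2 encoded_length → Spec_find_decoded_length2 encoded_length (find_decoded_length2 encoded_length)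

-- ===== LEMMAS AND PROOFS =====

theorem bitLength_mono {n m : Int} (hn : 0 ≤ n) (h : n ≤ m) :
    PySem.Int.bitLength n ≤ PySem.Int.bitLength m := by
  by_contra hlt
  push Not at hlt
  have hn0 : n ≠ 0 := by
    intro h0
    rw [h0, PySem.Int.bitLength_zero] at hlt
    omega
  have h1 := PySem.Int.two_pow_bitLength_le n hn0
  have h2 := PySem.Int.lt_two_pow_bitLength m
  have h3 : (2 : Nat) ^ PySem.Int.bitLength m ≤ 2 ^ (PySem.Int.bitLength n - 1) :=
    Nat.pow_le_pow_right (by norm_num) (by omega)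
  omega

theorem enc_strict_mono {n m : Int} (hn : 0 ≤ n) (h : n < m) :
    get_encoded_length n < get_encoded_length m := by
  have hb := bitLength_mono hn (le_of_lt h)
  have hb' : (PySem.Int.bitLength n : Int) ≤ (PySem.Int.bitLength m : Int) := by exact_mod_cast hb
  unfold get_encoded_length
  omega

theorem enc_inj {n m : Int} (hn : 0 ≤ n) (hm : 0 ≤ m)
    (h : get_encoded_length n = get_encoded_length m) : n = m := by
  rcases lt_trichotomy n m with h' | h' | h'
  · exact absurd h (ne_of_lt (enc_strict_mono hn h'))
  · exact h'
  · exact absurd h.symm (ne_of_lt (enc_strict_mono hm h'))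

theorem lt_enc (n : Int) : n < get_encoded_length n := by
  unfold get_encoded_length
  have : (0 : Int) ≤ (PySem.Int.bitLength n : Int) := Int.natCast_nonneg _
  omega

theorem searchA_char (e n : Int) (fuel : Nat) : ∀ start stop : Int,
    (stop + 1 - start).toNat ≤ fuel → 0 ≤ start →
    (searchA e fuel start stop = some n ↔ start ≤ n ∧ n ≤ stop ∧ get_encoded_length n = e) := by
  induction fuel with
  | zero =>
    intro start stop hk hs
    simp only [searchA]
    constructor
    · intro hc
      simp at hc
    · rintro ⟨h1, h2, _⟩
      omega
  | succ fuel ih =>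
    intro start stop hk hs
    simp only [searchA]
    by_cases h : start ≤ stop
    · have hb := PySem.Int.floordiv_two_mid_bounds h
      set mid := PySem.Int.floordiv (start + stop) 2 with hmid
      rw [if_pos h]
      by_cases he : e = get_encoded_length mid
      · rw [if_pos he]
        constructor
        · intro hc
          have := Option.some.inj hc
          subst this
          exact ⟨hb.1, hb.2, he.symm⟩
        · rintro ⟨h1, h2, h3⟩
          have heq := enc_inj (n := n) (m := mid) (by omega) (by omega) (h3.trans he)
          rw [heq]
      · rw [if_neg he]
        by_cases hlt : e < get_encoded_length mid
        · rw [if_pos hlt]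
          rw [ih start (mid - 1) (by omega) hs]
          constructor
          · rintro ⟨h1, h2, h3⟩
            exact ⟨h1, by omega, h3⟩
          · rintro ⟨h1, h2, h3⟩
            refine ⟨h1, ?_, h3⟩
            by_contra hge
            rcases (by omega : n = mid ∨ mid < n) with hnm | hnm
            · rw [hnm] at h3
              omega
            · have := enc_strict_mono (n := mid) (m := n) (by omega) hnm
              omega
        · rw [if_neg hlt]
          rw [ih (mid + 1) stop (by omega) (by omega)]
          constructor
          · rintro ⟨h1, h2, h3⟩
            exact ⟨by omega, h2, h3⟩
          · rintro ⟨h1, h2, h3⟩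
            refine ⟨?_, h2, h3⟩
            by_contra hge
            rcases (by omega : n < mid ∨ n = mid) with hnm | hnm
            · have := enc_strict_mono (n := n) (m := mid) (by omega) hnm
              omega
            · subst hnm
              omega
    · rw [if_neg h]
      constructor
      · intro hc
        simp at hc
      · rintro ⟨h1, h2, _⟩
        omega

theorem A_char (e n : Int) :
    find_decoded_length2 e = some n ↔ 0 ≤ n ∧ get_encoded_length n = e := by
  unfold find_decoded_length2
  rw [searchA_char e n (e + 1).toNat 0 e (by omega) le_rfl]
  constructor
  · rintro ⟨h1, _, h3⟩
    exact ⟨h1, h3⟩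
  · rintro ⟨h1, h2⟩
    have := lt_enc n
    exact ⟨h1, by omega, h2⟩

theorem B_char (e n : Int) :
    find_decoded_length2_alt e = some n ↔ 0 ≤ n ∧ get_encoded_length n = e := by
  constructor
  · intro h
    unfold find_decoded_length2_alt at h
    obtain ⟨k, _, hfk⟩ := List.exists_of_findSome?_eq_some h
    simp only [] at hfk
    split_ifs at hfk with hc
    · obtain ⟨hc1, hc2⟩ := hc
      have := Option.some.inj hfk
      subst this
      refine ⟨hc1, ?_⟩
      unfold get_encoded_length
      omega
  · rintro ⟨h1, h2⟩
    have hnk : e - (PySem.Int.bitLength n : Int) - 1 = n := by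
      unfold get_encoded_length at h2
      omega
    have hne : n < e := h2 ▸ lt_enc n
    have hmem : ((PySem.Int.bitLength n : Int)) ∈
        PySem.List.pyRange 0 ((PySem.Int.bitLength e : Int) + 1) 1 := by
      rw [PySem.List.mem_pyRange_one]
      have := bitLength_mono h1 (le_of_lt hne)
      exact ⟨Int.natCast_nonneg _, by omega⟩
    cases hres : find_decoded_length2_alt e with
    | none =>
      exfalso
      unfold find_decoded_length2_alt at hres
      have hz := List.findSome?_eq_none_iff.mp hres _ hmem
      simp [hnk, h1] at hz
    | some m =>
      unfold find_decoded_length2_alt at hres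
      obtain ⟨k, _, hfk⟩ := List.exists_of_findSome?_eq_some hres
      simp only [] at hfk
      split_ifs at hfk with hc
      · obtain ⟨hc1, hc2⟩ := hc
        have hm2 : get_encoded_length (e - k - 1) = e := by
          unfold get_encoded_length
          omega
        have hmn : m = n := by
          rw [← Option.some.inj hfk]
          exact enc_inj hc1 h1 (hm2.trans h2.symm)
        rw [hmn]

-- ===== VERDICT (by name: the statement is the Claim_ definition above) =====
theorem find_decoded_length2_spec : Claim_equal_find_decoded_length2 := by
  intro e _
  unfold Spec_find_decoded_length2
  cases hA : find_decoded_length2 e with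
  | some n => exact ((B_char e n).mpr ((A_char e n).mp hA)).symm
  | none =>
    cases hB : find_decoded_length2_alt e with
    | none => rfl
    | some n =>
      have := (A_char e n).mpr ((B_char e n).mp hB)
      rw [hA] at this
      exact absurd this (by simp)
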